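-- pv_equiv track=rewrite | github.com/t1seo/ps_study | selim/level1/82612cntmoney.py | solution
-- ===== SOURCE A (Python) =====
-- def solution(price, money, count):
--     answer = -1
--     sum = 0
--     for i in range(1, count + 1): # 3 + 6 + 9 + 12가 되는 for 문
--         sum += price * i
--     answer = sum - money
--     if (answer < 0): # max(0, answer)로 바꿔도 좋을 듯
--         return 0
--     return answer
-- ===== SOURCE B (Python) =====
-- def solution(price, money, count):
--     n = count if count > 0 else 0
--     total = price * (n * (n + 1) // 2)
--     return max(0, total - money)
-- ===== Notes on version B (the rewrite author's own statement) =====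
-- stated objective: faster
-- what changed: Replaces the O(count) accumulation loop by the closed-form arithmetic-series formula price*n*(n+1)//2 with a max-clamp.
import Mathlib
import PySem

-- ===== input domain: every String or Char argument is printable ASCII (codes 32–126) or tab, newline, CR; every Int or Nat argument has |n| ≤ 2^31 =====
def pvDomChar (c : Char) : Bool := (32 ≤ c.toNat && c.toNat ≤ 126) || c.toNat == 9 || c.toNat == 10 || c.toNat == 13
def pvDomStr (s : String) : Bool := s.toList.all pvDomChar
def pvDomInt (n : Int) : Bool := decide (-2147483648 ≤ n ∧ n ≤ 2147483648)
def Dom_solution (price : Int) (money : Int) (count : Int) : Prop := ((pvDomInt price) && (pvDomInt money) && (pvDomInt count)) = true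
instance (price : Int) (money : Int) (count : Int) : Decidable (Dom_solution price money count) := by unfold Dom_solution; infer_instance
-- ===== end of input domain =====

-- B replaces A's O(count) accumulation loop by the closed-form arithmetic-series
-- formula price * n*(n+1)//2 with a max-clamp (objective: faster).

-- ===== PORT A =====
def solution (price : Int) (money : Int) (count : Int) : Int :=
  -- answer = -1 (dead assignment); sum accumulated over range(1, count+1)
  let sum : Int := (PySem.List.pyRange 1 (count + 1) 1).foldl (fun s i => s + price * i) 0
  let answer := sum - money
  if answer < 0 then 0 else answer

-- ===== PORT B =====
def solution_alt (price : Int) (money : Int) (count : Int) : Int :=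
  let n : Int := if count > 0 then count else 0
  let total : Int := price * PySem.Int.floordiv (n * (n + 1)) 2
  max 0 (total - money)

-- ===== PRECONDITION & SPEC =====
def Spec_solution (price : Int) (money : Int) (count : Int) (out : Int) : Prop := out = solution_alt price money count
instance (price : Int) (money : Int) (count : Int) (out : Int) : Decidable (Spec_solution price money count out) := by unfold Spec_solution; infer_instance

-- ===== CLAIM (what is proved, stated in full; the proofs are below) =====
def Claim_equal_solution : Prop := ∀ (price : Int) (money : Int) (count : Int), Dom_solution price money count → Spec_solution price money count (solution price money count)

-- ===== LEMMAS AND PROOFS =====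

theorem tri_succ (a : Int) : a * (a + 1) / 2 + (a + 1) = (a + 1) * (a + 2) / 2 := by
  obtain ⟨k, hk⟩ : Even (a * (a + 1)) := Int.even_mul_succ_self a
  have h2 : (a + 1) * (a + 2) = (k + a + 1) + (k + a + 1) := by
    have : (a + 1) * (a + 2) = a * (a + 1) + 2 * (a + 1) := by ring
    omega
  rw [hk, h2]
  omega

theorem gauss_fold (price : Int) : ∀ n : Nat,
    (PySem.List.pyRange 1 ((n : Int) + 1) 1).foldl (fun s i => s + price * i) 0
      = price * (((n : Int) * ((n : Int) + 1)) / 2) := by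
  intro n
  induction n with
  | zero => simp [PySem.List.pyRange_one_eq_nil]
  | succ m ih =>
    have hsplit : PySem.List.pyRange 1 ((↑(m + 1) : Int) + 1) 1
        = PySem.List.pyRange 1 ((m : Int) + 1) 1 ++ [(m : Int) + 1] := by
      have : ((↑(m + 1) : Int) + 1) = ((m : Int) + 1) + 1 := by push_cast; ring
      rw [this, PySem.List.pyRange_one_succ_right (by omega)]
    rw [hsplit, List.foldl_append, ih]
    simp only [List.foldl_cons, List.foldl_nil]
    push_cast
    rw [show ((m:Int) + 1 + 1) = ((m:Int) + 2) by ring, ← tri_succ (m : Int)]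
    ring

theorem solution_closed (price money count : Int) :
    solution price money count = solution_alt price money count := by
  unfold solution solution_alt
  dsimp only
  rw [PySem.Int.floordiv_eq_ediv_of_pos (by omega)]
  by_cases hc : count > 0
  · have hcast : count = ((count.toNat : Int)) := by omega
    rw [if_pos hc, hcast, gauss_fold price count.toNat]
    omega
  · rw [if_neg hc, PySem.List.pyRange_one_eq_nil (by omega)]
    simp only [List.foldl_nil]
    omega

-- ===== VERDICT (by name: the statement is the Claim_ definition above) =====
theorem solution_spec : Claim_equal_solution := by
  intro price money count _
  exact solution_closed price money count
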